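-- pv_equiv track=rewrite | github.com/Min-su-Jeong/Algorithm_Study | 프로그래머스/1/160586. 대충 만든 자판/대충 만든 자판.py | solution
-- ===== SOURCE A (Python) =====
-- def solution(keymap, targets):
--     ret = []
--     keyDict = {}
--
--     for i in range(len(keymap)):
--         for j in range(len(keymap[i])):
--             ch = keymap[i][j]
--             if ch in keyDict.keys():
--                 keyDict[ch] = min(keyDict[ch], j+1)
--             else:
--                 keyDict[ch] = j+1
--
--     for target in targets:
--         cnt = 0
--         for ch in target:
--             if ch in keyDict.keys():
--                 cnt += keyDict[ch]
--             else:
--                 cnt = -1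
--                 break
--
--         ret.append(cnt)
--
--     return ret
-- ===== SOURCE B (Python) =====
-- def solution(keymap, targets):
--     ret = []
--     for target in targets:
--         cnt = 0
--         for ch in target:
--             best = None
--             for s in keymap:
--                 for j, c in enumerate(s):
--                     if c == ch:
--                         p = j + 1
--                         if best is None or p < best:
--                             best = p
--                         break
--             if best is None:
--                 cnt = -1
--                 break
--             cnt += best
--         ret.append(cnt)
--     return ret
-- ===== Notes on version B (the rewrite author's own statement) =====
-- stated objective: alternative
-- what changed: B removes A's precomputed char->min-position dictionary and instead, for each target character, rescans every keymap string for its first occurrence and takes the minimum 1-based position, with -1 on absence.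
import Mathlib
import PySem

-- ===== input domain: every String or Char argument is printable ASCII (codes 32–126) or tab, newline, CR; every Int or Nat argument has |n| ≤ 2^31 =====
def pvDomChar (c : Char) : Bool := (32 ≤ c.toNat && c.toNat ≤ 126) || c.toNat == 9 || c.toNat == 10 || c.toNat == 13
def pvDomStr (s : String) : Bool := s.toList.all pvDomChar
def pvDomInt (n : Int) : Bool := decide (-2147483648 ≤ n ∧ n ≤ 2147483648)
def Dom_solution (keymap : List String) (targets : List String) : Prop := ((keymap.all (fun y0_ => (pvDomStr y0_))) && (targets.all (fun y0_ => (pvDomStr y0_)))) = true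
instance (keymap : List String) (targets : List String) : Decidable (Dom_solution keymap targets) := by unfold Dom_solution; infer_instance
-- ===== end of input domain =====

-- B drops A's precomputed position dictionary and instead, for every target character,
-- rescans the keymap strings for the minimal 1-based position (alternative decomposition).

-- ===== PORT A =====
-- one dict-update step for (ch, j): keyDict[ch] = min(keyDict[ch], j+1) or j+1
def buildStep (d : PySem.Dict Char Int) (p : Char × Nat) : PySem.Dict Char Int :=
  match d.get? p.1 with
  | some v => d.insert p.1 (min v ((p.2 : Int) + 1))
  | none => d.insert p.1 ((p.2 : Int) + 1)

-- the two nested build loops over keymap[i][j]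
def buildDict (keymap : List String) : PySem.Dict Char Int :=
  keymap.foldl (fun d s => (s.toList.zipIdx).foldl buildStep d) PySem.Dict.empty

-- inner loop over target with break
def countA (d : PySem.Dict Char Int) : List Char → Int → Int
  | [], cnt => cnt
  | ch :: rest, cnt =>
    match d.get? ch with
    | some v => countA d rest (cnt + v)
    | none => -1

def solution (keymap : List String) (targets : List String) : List Int :=
  let keyDict := buildDict keymap
  targets.foldl (fun ret t => ret ++ [countA keyDict t.toList 0]) []

-- ===== PORT B =====
-- innermost loop: for j, c in enumerate(s): if c == ch: p = j+1; break
def scanStr (ch : Char) : List Char → Nat → Option Int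
  | [], _ => none
  | c :: rest, j => if c = ch then some ((j : Int) + 1) else scanStr ch rest (j + 1)

-- loop over keymap strings maintaining best
def bestOf (keymap : List String) (ch : Char) : Option Int :=
  keymap.foldl (fun best s =>
    match scanStr ch s.toList 0 with
    | none => best
    | some p =>
      match best with
      | none => some p
      | some b => if p < b then some p else some b) none

-- inner loop over target with break
def countB (keymap : List String) : List Char → Int → Int
  | [], cnt => cnt
  | ch :: rest, cnt =>
    match bestOf keymap ch with
    | some b => countB keymap rest (cnt + b)
    | none => -1

def solution_alt (keymap : List String) (targets : List String) : List Int :=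
  targets.foldl (fun ret t => ret ++ [countB keymap t.toList 0]) []

-- ===== PRECONDITION & SPEC =====
def Spec_solution (keymap : List String) (targets : List String) (out : List Int) : Prop := out = solution_alt keymap targets
instance (keymap : List String) (targets : List String) (out : List Int) : Decidable (Spec_solution keymap targets out) := by unfold Spec_solution; infer_instance

-- ===== CLAIM (what is proved, stated in full; the proofs are below) =====
def Claim_equal_solution : Prop := ∀ (keymap : List String) (targets : List String), Dom_solution keymap targets → Spec_solution keymap targets (solution keymap targets)

-- ===== LEMMAS AND PROOFS =====

-- once the dict holds w ≤ k+1 at ch, later positions (all ≥ k+1) never change it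
theorem buildStep_stable (cs : List Char) (ch : Char) (w : Int) :
    ∀ (k : Nat) (d : PySem.Dict Char Int), d.get? ch = some w → w ≤ (k : Int) + 1 →
    ((cs.zipIdx k).foldl buildStep d).get? ch = some w := by
  induction cs with
  | nil => intro k d h _; simpa using h
  | cons c cs ih =>
    intro k d h hw
    simp only [List.zipIdx_cons, List.foldl_cons]
    by_cases hc : c = ch
    · subst hc
      have : buildStep d (c, k) = d.insert c (min w ((k : Int) + 1)) := by
        simp [buildStep, h]
      rw [this]
      have hmin : min w ((k : Int) + 1) = w := min_eq_left hw
      refine ih (k + 1) _ ?_ ?_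
      · rw [hmin]; exact PySem.Dict.get?_insert_self _ _ _
      · push_cast; omega
    · have hne : ch ≠ c := fun h' => hc h'.symm
      have hstep : (buildStep d (c, k)).get? ch = some w := by
        unfold buildStep
        cases d.get? c <;> simp [PySem.Dict.get?_insert_of_ne _ _ hne, h]
      refine ih (k + 1) _ hstep ?_
      push_cast at hw ⊢; omega

-- one string of A's build loop computes the combine of the old entry with the first position
theorem build_string (ch : Char) (cs : List Char) :
    ∀ (k : Nat) (d : PySem.Dict Char Int),
    ((cs.zipIdx k).foldl buildStep d).get? ch =
      match scanStr ch cs k with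
      | none => d.get? ch
      | some p => some (match d.get? ch with | none => p | some v => min v p) := by
  induction cs with
  | nil => intro k d; simp [scanStr]
  | cons c cs ih =>
    intro k d
    simp only [List.zipIdx_cons, List.foldl_cons, scanStr]
    by_cases hc : c = ch
    · subst hc
      simp only [if_true]
      cases hd : d.get? c with
      | none =>
        have : buildStep d (c, k) = d.insert c ((k : Int) + 1) := by simp [buildStep, hd]
        rw [this]
        refine buildStep_stable cs c _ (k + 1) _ ?_ ?_
        · exact PySem.Dict.get?_insert_self _ _ _
        · push_cast; omega
      | some v =>
        have : buildStep d (c, k) = d.insert c (min v ((k : Int) + 1)) := by simp [buildStep, hd]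
        rw [this]
        refine buildStep_stable cs c _ (k + 1) _ ?_ ?_
        · exact PySem.Dict.get?_insert_self _ _ _
        · have := min_le_right v ((k : Int) + 1); push_cast; omega
    · have hne : ch ≠ c := fun h' => hc h'.symm
      have hstep : (buildStep d (c, k)).get? ch = d.get? ch := by
        unfold buildStep
        cases d.get? c <;> simp [PySem.Dict.get?_insert_of_ne _ _ hne]
      rw [ih (k + 1), hstep, if_neg hc]

-- A's whole build, read at ch, is B's best-of-scan fold
theorem buildDict_get (keymap : List String) (ch : Char) :
    (buildDict keymap).get? ch = bestOf keymap ch := by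
  unfold buildDict bestOf
  suffices h : ∀ (km : List String) (d : PySem.Dict Char Int),
      (km.foldl (fun d s => (s.toList.zipIdx).foldl buildStep d) d).get? ch =
        km.foldl (fun best s =>
          match scanStr ch s.toList 0 with
          | none => best
          | some p =>
            match best with
            | none => some p
            | some b => if p < b then some p else some b) (d.get? ch) by
    rw [h keymap PySem.Dict.empty, PySem.Dict.get?_empty]
  intro km
  induction km with
  | nil => intro d; rfl
  | cons s km ih =>
    intro d
    simp only [List.foldl_cons]
    rw [ih, build_string]
    congr 1
    cases scanStr ch s.toList 0 with
    | none => rfl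
    | some p =>
      cases d.get? ch with
      | none => rfl
      | some v =>
        rcases lt_or_ge p v with h | h
        · simp [min_eq_right h.le, if_pos h]
        · simp [min_eq_left h, if_neg (not_lt.mpr h)]

theorem count_eq (keymap : List String) (cs : List Char) :
    ∀ cnt, countA (buildDict keymap) cs cnt = countB keymap cs cnt := by
  induction cs with
  | nil => intro cnt; rfl
  | cons ch rest ih =>
    intro cnt
    simp only [countA, countB, buildDict_get keymap ch]
    cases bestOf keymap ch with
    | none => rfl
    | some b => exact ih _

-- ===== VERDICT (by name: the statement is the Claim_ definition above) =====
theorem solution_spec : Claim_equal_solution := by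
  intro keymap targets _
  unfold Spec_solution solution solution_alt
  simp only [count_eq]
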